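-- pv_equiv track=rewrite | github.com/Siddforeal/Blackhole_AI | bugintel/core/brain_review.py | _extract_endpoint_blocks
-- ===== SOURCE A (Python) =====
-- def _extract_endpoint_blocks(user_context: str) -> dict[str, str]:
--     lines = user_context.splitlines()
--     blocks: dict[str, list[str]] = {}
--     current_endpoint: str | None = None
--
--     for line in lines:
--         stripped = line.strip()
--
--         if stripped.startswith("Global actions:"):
--             current_endpoint = None
--             continue
--
--         if ". Endpoint:" in stripped:
--             endpoint = stripped.split(". Endpoint:", 1)[1].strip()
--             current_endpoint = endpoint
--             blocks[current_endpoint] = [line]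
--             continue
--
--         if current_endpoint:
--             blocks[current_endpoint].append(line)
--
--     return {endpoint: "\n".join(block_lines) for endpoint, block_lines in blocks.items()}
-- ===== SOURCE B (Python) =====
-- def _is_marker(line: str) -> bool:
--     s = line.strip()
--     return s.startswith("Global actions:") or ". Endpoint:" in s
--
--
-- def _scan_end(lines: list[str], i: int) -> int:
--     while i < len(lines) and not _is_marker(lines[i]):
--         i += 1
--     return i
--
--
-- def _extract_endpoint_blocks(user_context: str) -> dict[str, str]:
--     lines = user_context.splitlines()
--     result: dict[str, str] = {}
--     i, n = 0, len(lines)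
--     while i < n:
--         stripped = lines[i].strip()
--         if ". Endpoint:" in stripped and not stripped.startswith("Global actions:"):
--             name = stripped.split(". Endpoint:", 1)[1].strip()
--             j = _scan_end(lines, i + 1)
--             result[name] = "\n".join(lines[i:j])
--             i = j
--         else:
--             i += 1
--     return result
-- ===== Notes on version B (the rewrite author's own statement) =====
-- stated objective: alternative
-- what changed: Replaces A's per-line state machine (current-endpoint register plus dict of growing line lists) with a boundary scan: on seeing a header, B scans ahead to the next marker line and slices that whole block out in one step, never maintaining per-key accumulators.
-- intended difference: On inputs whose last empty-named '. Endpoint:' header is followed by a non-marker line, A returns only the header line as that block (its truthiness test 'if current_endpoint:' is falsy for the empty name, so following lines are dropped), while B returns the whole block up to the next marker, the intended value matching every other header. — e.g. on _extract_endpoint_blocks("a. Endpoint:\nb"): A returns [("", "a. Endpoint:")], B returns [("", "a. Endpoint:\nb")]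
import Mathlib
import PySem

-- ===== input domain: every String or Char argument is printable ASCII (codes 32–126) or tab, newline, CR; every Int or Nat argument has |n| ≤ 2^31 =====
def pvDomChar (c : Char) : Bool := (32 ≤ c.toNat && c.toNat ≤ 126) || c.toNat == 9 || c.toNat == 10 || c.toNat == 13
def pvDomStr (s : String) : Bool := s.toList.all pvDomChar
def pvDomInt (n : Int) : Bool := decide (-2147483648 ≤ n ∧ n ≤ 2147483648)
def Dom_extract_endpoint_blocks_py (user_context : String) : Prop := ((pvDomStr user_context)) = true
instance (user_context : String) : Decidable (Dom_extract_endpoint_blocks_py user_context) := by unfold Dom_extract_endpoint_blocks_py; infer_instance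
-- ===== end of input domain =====

-- B re-implements A's per-line state machine as a boundary-scan-and-slice pass (same cost);
-- on inputs whose last empty-named '. Endpoint:' header is followed by plain lines, A truncates
-- that block to the header line (falsy-string quirk) while B keeps the full block — see D_ below.

-- shared text helpers: both Pythons contain these same expressions
def isReset (stripped : String) : Bool := PySem.Str.startswith stripped "Global actions:"
def hasEndpoint (stripped : String) : Bool := PySem.Str.isIn ". Endpoint:" stripped
def headerName (stripped : String) : String :=
  PySem.Str.strip (((PySem.Str.splitMax? stripped ". Endpoint:" 1).getD []).getD 1 "")

-- ===== PORT A =====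
-- one iteration of A's for-loop; state = (blocks, current_endpoint);
-- `if current_endpoint:` is Python truthiness: none and "" both fail.
-- blocks[current].append(line) is Dict.modify with default [] — the key is always present there.
def aStep (st : PySem.Dict String (List String) × Option String) (line : String) :
    PySem.Dict String (List String) × Option String :=
  let stripped := PySem.Str.strip line
  if isReset stripped then (st.1, none)
  else if hasEndpoint stripped then
    let endpoint := headerName stripped
    (st.1.insert endpoint [line], some endpoint)
  else
    match st.2 with
    | some c => if c ≠ "" then (st.1.modify c [] (fun b => b ++ [line]), st.2) else st
    | none => st

def extract_endpoint_blocks_py (user_context : String) : List (String × String) :=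
  let lines := PySem.Str.splitlines user_context
  let fin := lines.foldl aStep (PySem.Dict.empty, none)
  -- final dict comprehension {endpoint: "\n".join(block) for ...}: a fold of inserts over the items
  (fin.1.items.foldl (fun d p => d.insert p.1 (PySem.Str.join "\n" p.2)) PySem.Dict.empty).items

-- ===== PORT B =====
def isMarkerL (line : String) : Bool :=
  let s := PySem.Str.strip line
  isReset s || hasEndpoint s

-- _scan_end's while loop, with fuel = lines.length - i making the decreasing measure structural
def scanEndF : Nat → List String → Nat → Nat
  | 0, _, i => i
  | fuel + 1, lines, i =>
    if i < lines.length ∧ isMarkerL (lines.getD i "") = false then scanEndF fuel lines (i + 1)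
    else i

def scanEnd (lines : List String) (i : Nat) : Nat := scanEndF (lines.length - i) lines i

-- the main while loop of B; fuel = lines.length - i (each step advances i by ≥ 1)
def bGoF : Nat → List String → Nat → PySem.Dict String String → PySem.Dict String String
  | 0, _, _, d => d
  | fuel + 1, lines, i, d =>
    if i < lines.length then
      let stripped := PySem.Str.strip (lines.getD i "")
      if hasEndpoint stripped && !isReset stripped then
        let j := scanEnd lines (i + 1)
        bGoF fuel lines j
          (d.insert (headerName stripped)
            (PySem.Str.join "\n" (PySem.List.slice lines (some (i : Int)) (some (j : Int)))))
      else bGoF fuel lines (i + 1) d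
    else d

def extract_endpoint_blocks_py_alt (user_context : String) : List (String × String) :=
  let lines := PySem.Str.splitlines user_context
  (bGoF lines.length lines 0 PySem.Dict.empty).items

-- ===== PRECONDITION & SPEC =====
-- an endpoint header whose name strips to ""
def isEmptyHdr (line : String) : Bool :=
  let s := PySem.Str.strip line
  hasEndpoint s && !isReset s && (headerName s == "")

-- the last empty-named header is immediately followed by a plain (non-marker) line
def lastBadB : List String → Bool
  | x :: y :: s =>
    if (y :: s).any isEmptyHdr then lastBadB (y :: s)
    else isEmptyHdr x && !isReset (PySem.Str.strip y) && !hasEndpoint (PySem.Str.strip y)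
  | _ => false

-- On inputs whose LAST empty-named '. Endpoint:' header is followed by a plain line, A returns
-- only the header line as that block (its `if current_endpoint:` is falsy for the name ""), while B
-- returns the whole block up to the next marker — the intended value, matching every other header.
def D_extract_endpoint_blocks_py (user_context : String) : Prop :=
  lastBadB (PySem.Str.splitlines user_context) = true

instance (user_context : String) : Decidable (D_extract_endpoint_blocks_py user_context) := by
  unfold D_extract_endpoint_blocks_py; infer_instance

def Spec_extract_endpoint_blocks_py (user_context : String) (out : List (String × String)) : Prop :=
  ¬ D_extract_endpoint_blocks_py user_context → out = extract_endpoint_blocks_py_alt user_context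
instance (user_context : String) (out : List (String × String)) : Decidable (Spec_extract_endpoint_blocks_py user_context out) := by
  unfold Spec_extract_endpoint_blocks_py; infer_instance

def pvDiffWitness_extract_endpoint_blocks_py : String := "a. Endpoint:\nb"
def pvDiffWitnessOut_extract_endpoint_blocks_py : (List (String × String)) × (List (String × String)) :=
  ([("", "a. Endpoint:")], [("", "a. Endpoint:\nb")])

-- ===== CLAIM (what is proved, stated in full; the proofs are below) =====
def Claim_unchanged_extract_endpoint_blocks_py : Prop := ∀ (user_context : String), Dom_extract_endpoint_blocks_py user_context → Spec_extract_endpoint_blocks_py user_context (extract_endpoint_blocks_py user_context)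
def Claim_exact_extract_endpoint_blocks_py : Prop := ∀ (user_context : String), Dom_extract_endpoint_blocks_py user_context → D_extract_endpoint_blocks_py user_context → extract_endpoint_blocks_py user_context ≠ extract_endpoint_blocks_py_alt user_context
def Claim_changed_extract_endpoint_blocks_py : Prop := Dom_extract_endpoint_blocks_py (pvDiffWitness_extract_endpoint_blocks_py) ∧ D_extract_endpoint_blocks_py (pvDiffWitness_extract_endpoint_blocks_py) ∧ extract_endpoint_blocks_py (pvDiffWitness_extract_endpoint_blocks_py) = pvDiffWitnessOut_extract_endpoint_blocks_py.1 ∧ extract_endpoint_blocks_py_alt (pvDiffWitness_extract_endpoint_blocks_py) = pvDiffWitnessOut_extract_endpoint_blocks_py.2 ∧ pvDiffWitnessOut_extract_endpoint_blocks_py.1 ≠ pvDiffWitnessOut_extract_endpoint_blocks_py.2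

-- ===== LEMMAS AND PROOFS =====

-- abbreviation used throughout the proofs
def J (ls : List String) : String := PySem.Str.join "\n" ls

-- "some line of ls is an empty-named endpoint header"
def EH (ls : List String) : Prop := ∃ l ∈ ls, isEmptyHdr l = true

-- the last empty-named header (if any) is followed by a marker line or the end of the list
def Ok : List String → Prop
  | [] => True
  | l :: ls => (isEmptyHdr l = true → ¬ EH ls → (ls = [] ∨ isMarkerL (ls.headD "") = true)) ∧ Ok ls

-- A's per-key line lists, joined — the shape A's final comprehension produces
def mapjoin (d : PySem.Dict String (List String)) : PySem.Dict String String :=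
  PySem.Dict.mk (d.items.map (fun p => (p.1, J p.2)))

-- structural (suffix-list) reformulation of B's index loop, used only in the proofs
def bGoL : List String → PySem.Dict String String → PySem.Dict String String
  | [], d => d
  | l :: ls, d =>
    let stripped := PySem.Str.strip l
    if hasEndpoint stripped && !isReset stripped then
      bGoL (ls.dropWhile (fun x => !isMarkerL x))
        (d.insert (headerName stripped) (J (l :: ls.takeWhile (fun x => !isMarkerL x))))
    else bGoL ls d
termination_by ls => ls.length
decreasing_by
  · have := List.length_dropWhile_le (fun x => !isMarkerL x) ls; simp; omega
  · simp

lemma scanEndF_spec : ∀ (fuel : Nat) (lines : List String) (i : Nat), lines.length ≤ i + fuel →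
    scanEndF fuel lines i = i + ((lines.drop i).takeWhile (fun x => !isMarkerL x)).length ∧
    lines.drop (scanEndF fuel lines i) = (lines.drop i).dropWhile (fun x => !isMarkerL x) := by
  intro fuel
  induction fuel with
  | zero =>
    intro lines i h
    have hd : lines.drop i = [] := List.drop_eq_nil_of_le (by omega)
    simp [scanEndF, hd]
  | succ fuel ih =>
    intro lines i h
    by_cases hi : i < lines.length
    · have hdrop : lines.drop i = lines[i] :: lines.drop (i + 1) := List.drop_eq_getElem_cons hi
      have hgd : lines.getD i "" = lines[i] := List.getD_eq_getElem lines "" hi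
      by_cases hm : isMarkerL (lines.getD i "") = false
      · have hstep : scanEndF (fuel + 1) lines i = scanEndF fuel lines (i + 1) := by
          simp only [scanEndF]; rw [if_pos ⟨hi, hm⟩]
        obtain ⟨h1, h2⟩ := ih lines (i + 1) (by omega)
        have hp : (!isMarkerL lines[i]) = true := by rw [← hgd, hm]; rfl
        have htw : (lines.drop i).takeWhile (fun x => !isMarkerL x) =
            lines[i] :: (lines.drop (i + 1)).takeWhile (fun x => !isMarkerL x) := by
          rw [hdrop]; simp only [List.takeWhile_cons, hp, if_true]
        have hdw : (lines.drop i).dropWhile (fun x => !isMarkerL x) =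
            (lines.drop (i + 1)).dropWhile (fun x => !isMarkerL x) := by
          rw [hdrop]; simp only [List.dropWhile_cons, hp, if_true]
        refine ⟨?_, ?_⟩
        · rw [hstep, h1, htw]; simp; omega
        · rw [hstep, h2, hdw]
      · have hm' : isMarkerL (lines.getD i "") = true := by
          cases hb : isMarkerL (lines.getD i "") with
          | false => exact absurd hb hm
          | true => rfl
        have hstep : scanEndF (fuel + 1) lines i = i := by
          simp only [scanEndF]
          rw [if_neg (by rintro ⟨-, hc⟩; rw [hm'] at hc; simp at hc)]
        have hp : (!isMarkerL lines[i]) = false := by rw [← hgd, hm']; rfl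
        refine ⟨?_, ?_⟩
        · rw [hstep, hdrop]; simp only [List.takeWhile_cons, hp, Bool.false_eq_true, if_false]
          simp
        · rw [hstep, hdrop]; simp only [List.dropWhile_cons, hp, Bool.false_eq_true, if_false]
    · have hd : lines.drop i = [] := List.drop_eq_nil_of_le (by omega)
      have hstep : scanEndF (fuel + 1) lines i = i := by
        simp only [scanEndF]
        rw [if_neg (by rintro ⟨hc, -⟩; omega)]
      simp [hstep, hd]

lemma take_takeWhile_length {p : String → Bool} (l : List String) :
    l.take (l.takeWhile p).length = l.takeWhile p := by
  have h := List.takeWhile_prefix (l := l) (p := p)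
  exact ((List.prefix_iff_eq_take.mp h).symm)

lemma scanEnd_ge (lines : List String) (i : Nat) (h : i ≤ lines.length) :
    i ≤ scanEnd lines i ∧ scanEnd lines i ≤ lines.length := by
  obtain ⟨h1, -⟩ := scanEndF_spec (lines.length - i) lines i (by omega)
  have h2 : ((lines.drop i).takeWhile (fun x => !isMarkerL x)).length ≤ (lines.drop i).length :=
    ((lines.drop i).takeWhile_prefix (fun x => !isMarkerL x)).length_le
  rw [List.length_drop] at h2
  unfold scanEnd
  omega

lemma bGo_bridge : ∀ (fuel : Nat) (lines : List String) (i : Nat) (d : PySem.Dict String String),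
    lines.length ≤ i + fuel → bGoF fuel lines i d = bGoL (lines.drop i) d := by
  intro fuel
  induction fuel with
  | zero =>
    intro lines i d h
    have hd : lines.drop i = [] := List.drop_eq_nil_of_le (by omega)
    simp [bGoF, hd, bGoL]
  | succ fuel ih =>
    intro lines i d h
    by_cases hi : i < lines.length
    · have hdrop : lines.drop i = lines[i] :: lines.drop (i + 1) := List.drop_eq_getElem_cons hi
      have hgd : lines.getD i "" = lines[i] := List.getD_eq_getElem lines "" hi
      by_cases hcond : (hasEndpoint (PySem.Str.strip lines[i]) &&
          !isReset (PySem.Str.strip lines[i])) = true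
      · obtain ⟨hj1, hj2⟩ := scanEndF_spec (lines.length - (i + 1)) lines (i + 1) (by omega)
        have hjdef : scanEnd lines (i + 1) = scanEndF (lines.length - (i + 1)) lines (i + 1) := rfl
        have hjv : scanEnd lines (i + 1) =
            i + 1 + ((lines.drop (i + 1)).takeWhile (fun x => !isMarkerL x)).length := by
          rw [hjdef, hj1]
        have hslice : PySem.List.slice lines (some (i : Int)) (some ((scanEnd lines (i + 1)) : Int)) =
            lines[i] :: (lines.drop (i + 1)).takeWhile (fun x => !isMarkerL x) := by
          rw [PySem.List.slice_natCast, hjv]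
          have h3 : i + 1 + ((lines.drop (i + 1)).takeWhile (fun x => !isMarkerL x)).length - i =
              ((lines.drop (i + 1)).takeWhile (fun x => !isMarkerL x)).length + 1 := by omega
          rw [h3, hdrop, List.take_succ_cons]
          exact congrArg (List.cons lines[i]) (take_takeWhile_length (lines.drop (i + 1)))
        have hrest : lines.drop (scanEnd lines (i + 1)) =
            (lines.drop (i + 1)).dropWhile (fun x => !isMarkerL x) := by rw [hjdef, hj2]
        have hstep : bGoF (fuel + 1) lines i d =
            bGoF fuel lines (scanEnd lines (i + 1))
              (d.insert (headerName (PySem.Str.strip lines[i])) (PySem.Str.join "\n"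
                (PySem.List.slice lines (some (i : Int)) (some ((scanEnd lines (i + 1)) : Int))))) := by
          simp only [bGoF, hgd]
          rw [if_pos hi, if_pos hcond]
        have hfuel : lines.length ≤ scanEnd lines (i + 1) + fuel := by
          have := (scanEnd_ge lines (i + 1) (by omega)).1
          omega
        rw [hstep, ih lines _ _ hfuel, hrest, hslice, hdrop]
        conv_rhs => rw [bGoL]
        rw [if_pos hcond]
        simp [J]
      · have hstep : bGoF (fuel + 1) lines i d = bGoF fuel lines (i + 1) d := by
          simp only [bGoF, hgd]
          rw [if_pos hi, if_neg hcond]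
        rw [hstep, ih lines _ _ (by omega), hdrop]
        conv_rhs => rw [bGoL]
        rw [if_neg hcond]
    · have hd : lines.drop i = [] := List.drop_eq_nil_of_le (by omega)
      have hstep : bGoF (fuel + 1) lines i d = d := by
        simp only [bGoF]
        rw [if_neg hi]
      simp [hstep, hd, bGoL]

-- ---- facts about the marker/header classifiers ----

lemma bfalse {b : Bool} (h : ¬ b = true) : b = false := by
  cases b
  · rfl
  · exact absurd rfl h

lemma bnot_true {b : Bool} (h : (!b) = true) : b = false := by
  cases b
  · rfl
  · exact absurd h (by simp)

lemma marker_false (x : String) (h : isMarkerL x = false) :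
    isReset (PySem.Str.strip x) = false ∧
    hasEndpoint (PySem.Str.strip x) = false := by
  simp only [isMarkerL, Bool.or_eq_false_iff] at h
  exact h

lemma eh_marker (x : String) (h : isEmptyHdr x = true) : isMarkerL x = true := by
  simp only [isEmptyHdr, Bool.and_eq_true] at h
  simp only [isMarkerL]
  rw [h.1.1, Bool.or_true]

lemma not_eh_of_starts (x : String)
    (h : isReset (PySem.Str.strip x) = true) :
    isEmptyHdr x = false := by
  simp only [isEmptyHdr]
  rw [h]
  simp

lemma not_eh_of_name (x : String) (h : headerName (PySem.Str.strip x) ≠ "") :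
    isEmptyHdr x = false := by
  have hb : (headerName (PySem.Str.strip x) == "") = false := beq_eq_false_iff_ne.mpr h
  simp only [isEmptyHdr]
  rw [hb]
  simp

lemma not_eh_of_notmarker (x : String) (h : isMarkerL x = false) : isEmptyHdr x = false := by
  cases hb : isEmptyHdr x with
  | false => rfl
  | true => rw [eh_marker x hb] at h; exact absurd h (by simp)

lemma eh_true_of (x : String) (hin : hasEndpoint (PySem.Str.strip x) = true)
    (hgs : isReset (PySem.Str.strip x) = false)
    (hnm : headerName (PySem.Str.strip x) = "") : isEmptyHdr x = true := by
  simp only [isEmptyHdr]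
  rw [hin, hgs, hnm]
  decide

-- ---- EH and Ok closure ----

lemma EH_cons_elim {x : String} {r : List String} (hx : isEmptyHdr x = false) (h : EH (x :: r)) :
    EH r := by
  rcases h with ⟨l, hl, he⟩
  rcases List.mem_cons.mp hl with rfl | hl'
  · rw [hx] at he; exact absurd he (by simp)
  · exact ⟨l, hl', he⟩

lemma EH_append_elim {body rest : List String} (hb : ∀ y ∈ body, isMarkerL y = false)
    (h : EH (body ++ rest)) : EH rest := by
  induction body with
  | nil => exact h
  | cons y b ih =>
    exact ih (fun z hz => hb z (by simp [hz]))
      (EH_cons_elim (not_eh_of_notmarker y (hb y (by simp))) h)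

lemma Ok_tail {x : String} {r : List String} (h : Ok (x :: r)) : Ok r := h.2

lemma Ok_append : ∀ (body rest : List String), Ok (body ++ rest) → Ok rest := by
  intro body
  induction body with
  | nil => exact fun rest h => h
  | cons y b ih => exact fun rest h => ih rest h.2

lemma dropWhile_head (l : List String) :
    l.dropWhile (fun x => !isMarkerL x) = [] ∨
    isMarkerL ((l.dropWhile (fun x => !isMarkerL x)).headD "") = true := by
  induction l with
  | nil => left; rfl
  | cons x l ih =>
    by_cases hx : isMarkerL x = true
    · right
      rw [List.dropWhile_cons]
      simp [hx]
    · have hx' : (!isMarkerL x) = true := by rw [bfalse hx]; rfl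
      rw [List.dropWhile_cons]
      simp only [hx', if_true]
      exact ih

-- ---- A's loop on marker-free segments ----

lemma skip_A : ∀ (body : List String), (∀ x ∈ body, isMarkerL x = false) →
    ∀ (d : PySem.Dict String (List String)) (cur : Option String),
    (cur = none ∨ cur = some "") → List.foldl aStep (d, cur) body = (d, cur) := by
  intro body
  induction body with
  | nil => intro _ d cur _; rfl
  | cons x b ih =>
    intro hb d cur hcur
    obtain ⟨h1, h2⟩ := marker_false x (hb x (by simp))
    have hstep : aStep (d, cur) x = (d, cur) := by
      simp only [aStep]
      rw [if_neg (by rw [h1]; simp), if_neg (by rw [h2]; simp)]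
      rcases hcur with rfl | rfl
      · rfl
      · simp
    rw [List.foldl_cons, hstep]
    exact ih (fun y hy => hb y (by simp [hy])) d cur hcur

lemma append_A : ∀ (body : List String), (∀ x ∈ body, isMarkerL x = false) →
    ∀ (d : PySem.Dict String (List String)) (nm : String) (acc : List String), nm ≠ "" →
    List.foldl aStep (d.insert nm acc, some nm) body = (d.insert nm (acc ++ body), some nm) := by
  intro body
  induction body with
  | nil => intro _ d nm acc _; simp
  | cons x b ih =>
    intro hb d nm acc hnm
    obtain ⟨h1, h2⟩ := marker_false x (hb x (by simp))
    have hstep : aStep (d.insert nm acc, some nm) x = (d.insert nm (acc ++ [x]), some nm) := by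
      simp only [aStep]
      rw [if_neg (by rw [h1]; simp), if_neg (by rw [h2]; simp)]
      simp only [if_pos hnm]
      rw [PySem.Dict.modify, PySem.Dict.getD_insert_self, PySem.Dict.insert_insert_self]
    rw [List.foldl_cons, hstep,
      ih (fun y hy => hb y (by simp [hy])) d nm (acc ++ [x]) hnm]
    simp

-- ---- mapjoin and Dict facts ----

lemma contains_mapjoin (d : PySem.Dict String (List String)) (k : String) :
    (mapjoin d).contains k = d.contains k := by
  simp only [mapjoin, PySem.Dict.contains, List.any_map]
  rfl

lemma mapjoin_insert (d : PySem.Dict String (List String)) (k : String) (v : List String) :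
    mapjoin (d.insert k v) = (mapjoin d).insert k (J v) := by
  apply PySem.Dict.ext
  by_cases hc : d.contains k = true
  · have hc2 : (mapjoin d).contains k = true := by rw [contains_mapjoin]; exact hc
    show ((d.insert k v).items.map (fun p => (p.1, J p.2))) = _
    rw [PySem.Dict.items_insert, if_pos hc, PySem.Dict.items_insert, if_pos hc2]
    show _ = ((d.items.map (fun p => (p.1, J p.2))).map
      (fun p => if (p.1 == k) = true then (k, J v) else p))
    rw [List.map_map, List.map_map]
    apply List.map_congr_left
    intro p _
    by_cases hpk : (p.1 == k) = true
    · simp [Function.comp, hpk]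
    · simp [Function.comp, hpk]
  · have hc' : d.contains k = false := bfalse hc
    have hc2 : (mapjoin d).contains k = false := by rw [contains_mapjoin]; exact hc'
    show ((d.insert k v).items.map (fun p => (p.1, J p.2))) = _
    rw [PySem.Dict.items_insert, if_neg (by rw [hc']; simp),
      PySem.Dict.items_insert, if_neg (by rw [hc2]; simp)]
    show _ = (d.items.map (fun p => (p.1, J p.2))) ++ [(k, J v)]
    rw [List.map_append]
    rfl

lemma insert_comm_blank (M : PySem.Dict String String) (hc : M.contains "" = true)
    (n : String) (hn : n ≠ "") (v w : String) :
    (M.insert "" v).insert n w = (M.insert n w).insert "" v := by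
  apply PySem.Dict.ext
  have hne : (n == "") = false := beq_eq_false_iff_ne.mpr hn
  by_cases hcn : M.contains n = true
  · have c1 : (M.insert "" v).contains n = true := by
      rw [PySem.Dict.contains_insert]; simp [hcn]
    have c2 : (M.insert n w).contains "" = true := by
      rw [PySem.Dict.contains_insert]; simp [hc]
    rw [PySem.Dict.items_insert, if_pos c1, PySem.Dict.items_insert, if_pos hc,
      PySem.Dict.items_insert, if_pos c2, PySem.Dict.items_insert, if_pos hcn]
    rw [List.map_map, List.map_map]
    apply List.map_congr_left
    intro p _
    by_cases hp0 : (p.1 == "") = true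
    · have hp0' : p.1 = "" := by simpa using hp0
      simp [Function.comp, hp0', Ne.symm hn]
    · by_cases hpn : (p.1 == n) = true
      · have hpn' : p.1 = n := by simpa using hpn
        simp [Function.comp, hpn', hn]
      · simp [Function.comp, hp0, hpn]
  · have hcn' : M.contains n = false := bfalse hcn
    have c1 : (M.insert "" v).contains n = false := by
      rw [PySem.Dict.contains_insert]; simp [hcn', hne]
    have c2 : (M.insert n w).contains "" = true := by
      rw [PySem.Dict.contains_insert]; simp [hc]
    rw [PySem.Dict.items_insert, if_neg (by rw [c1]; simp),
      PySem.Dict.items_insert, if_pos hc, PySem.Dict.items_insert, if_pos c2,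
      PySem.Dict.items_insert, if_neg (by rw [hcn']; simp)]
    rw [List.map_append]
    simp only [List.map_cons, List.map_nil, hne, Bool.false_eq_true, if_false]

lemma nodup_aStep (st : PySem.Dict String (List String) × Option String) (x : String)
    (h : st.1.keys.Nodup) : (aStep st x).1.keys.Nodup := by
  obtain ⟨d, cur⟩ := st
  simp only [aStep]
  by_cases h1 : isReset (PySem.Str.strip x) = true
  · rw [if_pos h1]; exact h
  · rw [if_neg h1]
    by_cases h2 : hasEndpoint (PySem.Str.strip x) = true
    · rw [if_pos h2]
      exact PySem.Dict.nodup_keys_insert _ _ _ h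
    · rw [if_neg h2]
      cases cur with
      | none => exact h
      | some c =>
        show (if c ≠ "" then ((d.modify c [] fun b => b ++ [x]), some c)
          else (d, some c)).1.keys.Nodup
        by_cases hcb : c = ""
        · rw [if_neg (by intro hh; exact hh hcb)]
          exact h
        · rw [if_pos hcb]
          show (d.modify c [] fun b => b ++ [x]).keys.Nodup
          rw [PySem.Dict.modify]
          exact PySem.Dict.nodup_keys_insert _ _ _ h

lemma nodup_foldl_A : ∀ (ls : List String) (st : PySem.Dict String (List String) × Option String),
    st.1.keys.Nodup → (List.foldl aStep st ls).1.keys.Nodup := by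
  intro ls
  induction ls with
  | nil => exact fun st h => h
  | cons x l ih =>
    intro st h
    rw [List.foldl_cons]
    exact ih (aStep st x) (nodup_aStep st x h)

lemma post_eq_mapjoin (d : PySem.Dict String (List String)) (hnd : d.keys.Nodup) :
    (d.items.foldl (fun d' p => d'.insert p.1 (PySem.Str.join "\n" p.2)) PySem.Dict.empty).items =
    (mapjoin d).items := by
  have hfresh : ∀ a ∈ d.items, (PySem.Dict.empty : PySem.Dict String String).contains a.1 = false :=
    fun a _ => rfl
  have hnd' : (d.items.map (fun p => p.1)).Nodup := by
    simpa [PySem.Dict.keys] using hnd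
  have hmain := PySem.Dict.items_foldl_insert_fresh d.items (fun p => p.1)
    (fun p => PySem.Str.join "\n" p.2) PySem.Dict.empty hfresh hnd'
  have hempty : (PySem.Dict.empty : PySem.Dict String String).items = [] := rfl
  exact hmain.trans (by rw [hempty]; simp [mapjoin, J])

-- ---- the central induction: A's state machine versus B's block chunking ----

lemma main_A_B : ∀ (N : Nat) (ls : List String), ls.length ≤ N →
    ∀ (dA : PySem.Dict String (List String)) (dB : PySem.Dict String String) (cur : Option String),
    Ok ls →
    (cur = none ∨ cur = some "" ∨ ls = [] ∨ isMarkerL (ls.headD "") = true) →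
    (dB = mapjoin dA ∨ (dA.contains "" = true ∧ EH ls ∧ ∃ v, dB = (mapjoin dA).insert "" v)) →
    mapjoin (List.foldl aStep (dA, cur) ls).1 = bGoL ls dB := by
  intro N
  induction N with
  | zero =>
    intro ls hlen dA dB cur _ _ hH
    cases ls with
    | cons x r => exact absurd hlen (by simp)
    | nil =>
      rcases hH with h1 | ⟨-, hEH, -⟩
      · simp [bGoL, h1]
      · exact absurd hEH (by simp [EH])
  | succ N ih =>
    intro ls hlen dA dB cur hOk hinert hH
    cases ls with
    | nil =>
      rcases hH with h1 | ⟨-, hEH, -⟩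
      · simp [bGoL, h1]
      · exact absurd hEH (by simp [EH])
    | cons x r =>
      have hrlen : r.length ≤ N := by simp only [List.length_cons] at hlen; omega
      by_cases hgs : isReset (PySem.Str.strip x) = true
      · -- reset line
        have hstep : aStep (dA, cur) x = (dA, none) := by
          simp only [aStep]
          rw [if_pos hgs]
        have hB : bGoL (x :: r) dB = bGoL r dB := by
          conv_lhs => rw [bGoL]
          rw [if_neg (by rw [hgs]; simp)]
        rw [List.foldl_cons, hstep, hB]
        refine ih r hrlen dA dB none (Ok_tail hOk) (Or.inl rfl) ?_
        rcases hH with h1 | ⟨hc, hEH, hv⟩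
        · exact Or.inl h1
        · exact Or.inr ⟨hc, EH_cons_elim (not_eh_of_starts x hgs) hEH, hv⟩
      · by_cases hin : hasEndpoint (PySem.Str.strip x) = true
        · -- header line
          have hcondB : (hasEndpoint (PySem.Str.strip x) &&
              !isReset (PySem.Str.strip x)) = true := by
            rw [hin, bfalse hgs]
            rfl
          have hstep : aStep (dA, cur) x =
              (dA.insert (headerName (PySem.Str.strip x)) [x],
               some (headerName (PySem.Str.strip x))) := by
            simp only [aStep]
            rw [if_neg hgs, if_pos hin]
          have hsplit : (r.takeWhile (fun y => !isMarkerL y)) ++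
              (r.dropWhile (fun y => !isMarkerL y)) = r := List.takeWhile_append_dropWhile
          set body := r.takeWhile (fun y => !isMarkerL y) with hbodyd
          set rest := r.dropWhile (fun y => !isMarkerL y) with hrestd
          have hbody : ∀ y ∈ body, isMarkerL y = false := by
            intro y hy
            have := List.mem_takeWhile_imp hy
            simpa using this
          have hrest : rest = [] ∨ isMarkerL (rest.headD "") = true := dropWhile_head r
          have hrestlen : rest.length ≤ N := by
            have hle : rest.length ≤ r.length := by
              rw [hrestd]
              exact List.length_dropWhile_le _ _
            omega
          have hinert' : (some (headerName (PySem.Str.strip x)) = none ∨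
              some (headerName (PySem.Str.strip x)) = some "" ∨ rest = [] ∨
              isMarkerL (rest.headD "") = true) := by
            rcases hrest with h | h
            · exact Or.inr (Or.inr (Or.inl h))
            · exact Or.inr (Or.inr (Or.inr h))
          have hOkrest : Ok rest := Ok_append body rest (by rw [hsplit]; exact Ok_tail hOk)
          have hB : bGoL (x :: r) dB =
              bGoL rest (dB.insert (headerName (PySem.Str.strip x)) (J (x :: body))) := by
            conv_lhs => rw [bGoL]
            rw [if_pos hcondB]
          rw [List.foldl_cons, hstep, hB, ← hsplit, List.foldl_append]
          by_cases hnm : headerName (PySem.Str.strip x) = ""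
          · -- empty-named header: A never appends to it
            have hskip : List.foldl aStep
                (dA.insert (headerName (PySem.Str.strip x)) [x],
                 some (headerName (PySem.Str.strip x))) body =
                (dA.insert (headerName (PySem.Str.strip x)) [x],
                 some (headerName (PySem.Str.strip x))) := by
              rw [hnm]
              exact skip_A body hbody (dA.insert "" [x]) (some "") (Or.inr rfl)
            rw [hskip]
            have hxe : isEmptyHdr x = true := eh_true_of x hin (bfalse hgs) hnm
            by_cases hEHrest : EH rest
            · refine ih rest hrestlen (dA.insert (headerName (PySem.Str.strip x)) [x]) _
                (some (headerName (PySem.Str.strip x))) hOkrest hinert' ?_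
              refine Or.inr ⟨?_, hEHrest, ⟨J (x :: body), ?_⟩⟩
              · rw [hnm]
                exact PySem.Dict.contains_insert_self dA "" [x]
              · rw [hnm, mapjoin_insert]
                rcases hH with h1 | ⟨-, -, v, hv⟩
                · rw [h1, PySem.Dict.insert_insert_self]
                · rw [hv, PySem.Dict.insert_insert_self, PySem.Dict.insert_insert_self]
            · -- x is the LAST empty header; Ok forces an empty body
              have hnEHr : ¬ EH r := by
                intro hEHr
                refine hEHrest (EH_append_elim hbody ?_)
                rw [hsplit]
                exact hEHr
              have hbodynil : body = [] := by
                rcases hOk.1 hxe hnEHr with hr | hr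
                · rw [hbodyd, hr]
                  rfl
                · cases hr' : r with
                  | nil => rw [hbodyd, hr']; rfl
                  | cons y r' =>
                    rw [hr'] at hr
                    rw [List.headD_cons] at hr
                    rw [hbodyd, hr', List.takeWhile_cons]
                    simp [hr]
              refine ih rest hrestlen (dA.insert (headerName (PySem.Str.strip x)) [x]) _
                (some (headerName (PySem.Str.strip x))) hOkrest hinert' (Or.inl ?_)
              rw [hbodynil, hnm, mapjoin_insert]
              rcases hH with h1 | ⟨-, -, v, hv⟩
              · rw [h1]
              · rw [hv, PySem.Dict.insert_insert_self]
          · -- properly named header: A accumulates the body onto it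
            rw [append_A body hbody dA (headerName (PySem.Str.strip x)) [x] hnm]
            have hone : ([x] ++ body) = x :: body := rfl
            rw [hone]
            refine ih rest hrestlen
              (dA.insert (headerName (PySem.Str.strip x)) (x :: body)) _
              (some (headerName (PySem.Str.strip x))) hOkrest hinert' ?_
            rcases hH with h1 | ⟨hc, hEH, v, hv⟩
            · refine Or.inl ?_
              rw [h1, mapjoin_insert]
            · refine Or.inr ⟨?_, ?_, ⟨v, ?_⟩⟩
              · rw [PySem.Dict.contains_insert]
                simp [hc]
              · refine EH_append_elim hbody ?_
                rw [hsplit]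
                exact EH_cons_elim (not_eh_of_name x hnm) hEH
              · rw [hv, mapjoin_insert,
                  insert_comm_blank (mapjoin dA) (by rw [contains_mapjoin]; exact hc)
                    (headerName (PySem.Str.strip x)) hnm v (J (x :: body))]
        · -- plain line
          have hmx : isMarkerL x = false := by
            simp only [isMarkerL]
            rw [bfalse hgs, bfalse hin]
            rfl
          have hcur : cur = none ∨ cur = some "" := by
            rcases hinert with h | h | h | h
            · exact Or.inl h
            · exact Or.inr h
            · exact absurd h (by simp)
            · rw [List.headD_cons] at h
              rw [h] at hmx
              exact absurd hmx (by simp)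
          have hstep : aStep (dA, cur) x = (dA, cur) := by
            simp only [aStep]
            rw [if_neg hgs, if_neg hin]
            rcases hcur with rfl | rfl
            · rfl
            · simp
          have hB : bGoL (x :: r) dB = bGoL r dB := by
            conv_lhs => rw [bGoL]
            rw [if_neg (by rw [bfalse hin]; simp)]
          rw [List.foldl_cons, hstep, hB]
          refine ih r hrlen dA dB cur (Ok_tail hOk) ?_ ?_
          · rcases hcur with rfl | rfl
            · exact Or.inl rfl
            · exact Or.inr (Or.inl rfl)
          · rcases hH with h1 | ⟨hc, hEH, hv⟩
            · exact Or.inl h1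
            · exact Or.inr ⟨hc, EH_cons_elim (not_eh_of_notmarker x hmx) hEH, hv⟩

-- ---- ¬D_ gives Ok ----

lemma lastBad_none : ∀ (L : List String), (∀ z ∈ L, isEmptyHdr z = false) → lastBadB L = false := by
  intro L
  induction L with
  | nil => intro _; rfl
  | cons x s ih =>
    cases s with
    | nil => intro _; rfl
    | cons y t =>
      intro h
      have hany : ((y :: t).any isEmptyHdr) = false := by
        refine List.any_eq_false.mpr ?_
        intro z hz
        rw [h z (List.mem_cons_of_mem x hz)]
        simp
      show (if (y :: t).any isEmptyHdr = true then lastBadB (y :: t)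
        else isEmptyHdr x && !isReset (PySem.Str.strip y) && !hasEndpoint (PySem.Str.strip y)) = false
      rw [if_neg (by rw [hany]; simp), h x List.mem_cons_self]
      rfl

lemma ok_of_nlb : ∀ (L : List String), lastBadB L = false → Ok L := by
  intro L
  induction L with
  | nil => intro _; trivial
  | cons x s ih =>
    cases s with
    | nil => intro _; exact ⟨fun _ _ => Or.inl rfl, trivial⟩
    | cons y t =>
      intro h
      rw [show lastBadB (x :: y :: t) = (if (y :: t).any isEmptyHdr = true then lastBadB (y :: t)
        else isEmptyHdr x && !isReset (PySem.Str.strip y) && !hasEndpoint (PySem.Str.strip y)) from rfl] at h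
      by_cases hany : ((y :: t).any isEmptyHdr) = true
      · rw [if_pos hany] at h
        refine ⟨fun hx hnEH => ?_, ih h⟩
        obtain ⟨z, hz, hez⟩ := List.any_eq_true.mp hany
        exact absurd ⟨z, hz, hez⟩ hnEH
      · rw [if_neg hany] at h
        have hno : ∀ z ∈ y :: t, isEmptyHdr z = false := by
          intro z hz
          refine bfalse ?_
          intro hez
          exact hany (List.any_eq_true.mpr ⟨z, hz, hez⟩)
        refine ⟨fun hx _ => Or.inr ?_, ih (lastBad_none (y :: t) hno)⟩
        rw [hx] at h
        rw [List.headD_cons]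
        simp only [isMarkerL]
        cases hr : isReset (PySem.Str.strip y) with
        | true => rfl
        | false =>
          cases hh : hasEndpoint (PySem.Str.strip y) with
          | true => rfl
          | false =>
            rw [hr, hh] at h
            exact absurd h (by simp)

-- ---- tightness: inside D_ the two results differ at key "" ----

lemma name_ne (z : String) (hin : hasEndpoint (PySem.Str.strip z) = true)
    (hgs : isReset (PySem.Str.strip z) = false) (hz : isEmptyHdr z = false) :
    headerName (PySem.Str.strip z) ≠ "" := by
  intro hnm
  rw [eh_true_of z hin hgs hnm] at hz
  exact absurd hz (by simp)

lemma get?_mapjoin (d : PySem.Dict String (List String)) (k : String) :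
    (mapjoin d).get? k = (d.get? k).map (fun v => J v) := by
  simp only [PySem.Dict.get?, mapjoin]
  rw [List.find?_map]
  have hp : ((fun p : String × String => p.1 == k) ∘
      (fun p : String × List String => (p.1, J p.2))) = (fun p => p.1 == k) := rfl
  rw [hp]
  cases h : d.items.find? (fun p => p.1 == k) <;> simp [h]

lemma A_blank_preserved : ∀ (ls : List String)
    (st : PySem.Dict String (List String) × Option String),
    (∀ z ∈ ls, isEmptyHdr z = false) →
    (List.foldl aStep st ls).1.get? "" = st.1.get? "" := by
  intro ls
  induction ls with
  | nil => intro st _; rfl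
  | cons x l ih =>
    intro st h
    rw [List.foldl_cons, ih (aStep st x) (fun z hz => h z (List.mem_cons_of_mem x hz))]
    obtain ⟨d, cur⟩ := st
    simp only [aStep]
    by_cases h1 : isReset (PySem.Str.strip x) = true
    · rw [if_pos h1]
    · rw [if_neg h1]
      by_cases h2 : hasEndpoint (PySem.Str.strip x) = true
      · rw [if_pos h2]
        exact PySem.Dict.get?_insert_of_ne d [x]
          (Ne.symm (name_ne x h2 (bfalse h1) (h x List.mem_cons_self)))
      · rw [if_neg h2]
        cases cur with
        | none => rfl
        | some c =>
          show (if c ≠ "" then ((d.modify c [] fun b => b ++ [x]), some c)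
            else (d, some c)).1.get? "" = d.get? ""
          by_cases hcb : c = ""
          · rw [if_neg (by intro hh; exact hh hcb)]
          · rw [if_pos hcb]
            show ((d.modify c [] fun b => b ++ [x]).get? "") = d.get? ""
            rw [PySem.Dict.modify]
            exact PySem.Dict.get?_insert_of_ne d _ (fun hh => hcb hh.symm)

lemma B_blank_preserved : ∀ (N : Nat) (ls : List String), ls.length ≤ N →
    ∀ (dB : PySem.Dict String String), (∀ z ∈ ls, isEmptyHdr z = false) →
    (bGoL ls dB).get? "" = dB.get? "" := by
  intro N
  induction N with
  | zero =>
    intro ls hlen dB _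
    cases ls with
    | nil => simp [bGoL]
    | cons x r => exact absurd hlen (by simp)
  | succ N ih =>
    intro ls hlen dB h
    cases ls with
    | nil => simp [bGoL]
    | cons x r =>
      have hrlen : r.length ≤ N := by simp only [List.length_cons] at hlen; omega
      by_cases hdr : (hasEndpoint (PySem.Str.strip x) && !isReset (PySem.Str.strip x)) = true
      · have hdr2 := hdr
        simp only [Bool.and_eq_true] at hdr2
        obtain ⟨hin, hns⟩ := hdr2
        have hB : bGoL (x :: r) dB = bGoL (r.dropWhile (fun y => !isMarkerL y))
            (dB.insert (headerName (PySem.Str.strip x))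
              (J (x :: r.takeWhile (fun y => !isMarkerL y)))) := by
          conv_lhs => rw [bGoL]
          rw [if_pos hdr]
        rw [hB, ih (r.dropWhile (fun y => !isMarkerL y))
          (le_trans (List.length_dropWhile_le _ _) hrlen) _
          (fun z hz => h z (List.mem_cons_of_mem x
            (List.Sublist.mem hz (List.dropWhile_sublist _))))]
        exact PySem.Dict.get?_insert_of_ne dB _
          (Ne.symm (name_ne x hin (bnot_true hns) (h x List.mem_cons_self)))
      · have hB : bGoL (x :: r) dB = bGoL r dB := by
          conv_lhs => rw [bGoL]
          rw [if_neg hdr]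
        rw [hB]
        exact ih r hrlen dB (fun z hz => h z (List.mem_cons_of_mem x hz))

lemma lastBad_cons_elim {x y : String} {s : List String} (h : lastBadB (x :: y :: s) = true) :
    ((y :: s).any isEmptyHdr = true ∧ lastBadB (y :: s) = true) ∨
    ((y :: s).any isEmptyHdr = false ∧ isEmptyHdr x = true ∧
      isReset (PySem.Str.strip y) = false ∧ hasEndpoint (PySem.Str.strip y) = false) := by
  rw [show lastBadB (x :: y :: s) = (if (y :: s).any isEmptyHdr = true then lastBadB (y :: s)
    else isEmptyHdr x && !isReset (PySem.Str.strip y) && !hasEndpoint (PySem.Str.strip y))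
    from rfl] at h
  by_cases hany : ((y :: s).any isEmptyHdr) = true
  · rw [if_pos hany] at h
    exact Or.inl ⟨hany, h⟩
  · rw [if_neg hany] at h
    simp only [Bool.and_eq_true] at h
    obtain ⟨⟨he2, hr2⟩, hh⟩ := h
    exact Or.inr ⟨bfalse hany, he2, bnot_true hr2, bnot_true hh⟩

lemma lastBad_skip : ∀ (body rest : List String), (∀ z ∈ body, isEmptyHdr z = false) →
    rest.any isEmptyHdr = true → lastBadB (body ++ rest) = lastBadB rest := by
  intro body
  induction body with
  | nil => intro rest _ _; rfl
  | cons b bs ih =>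
    intro rest hcl hany
    cases hbr : bs ++ rest with
    | nil =>
      rcases List.append_eq_nil_iff.mp hbr with ⟨-, hrn⟩
      rw [hrn] at hany
      exact absurd hany (by simp)
    | cons c t =>
      have hany2 : ((c :: t).any isEmptyHdr) = true := by
        rw [← hbr, List.any_append, hany, Bool.or_true]
      rw [List.cons_append, hbr]
      rw [show lastBadB (b :: c :: t) = (if (c :: t).any isEmptyHdr = true then lastBadB (c :: t)
        else isEmptyHdr b && !isReset (PySem.Str.strip c) && !hasEndpoint (PySem.Str.strip c))
        from rfl, if_pos hany2, ← hbr]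
      exact ih rest (fun z hz => hcl z (List.mem_cons_of_mem b hz)) hany

lemma join_len_lt (x y : String) (t : List String) :
    (PySem.Str.join "\n" [x]).toList.length < (PySem.Str.join "\n" (x :: y :: t)).toList.length := by
  rw [PySem.Str.toList_join, PySem.Str.toList_join]
  have hsep : ("\n".toList).length = 1 := rfl
  simp only [List.map_cons, List.map_nil, PySem.Chars.join_singleton,
    PySem.Chars.join_cons_cons, List.length_append, hsep]
  omega

lemma diff_go : ∀ (N : Nat) (ls : List String), ls.length ≤ N →
    ∀ (dA : PySem.Dict String (List String)) (cur : Option String)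
      (dB : PySem.Dict String String),
    lastBadB ls = true →
    ∃ a b : String,
      (mapjoin (List.foldl aStep (dA, cur) ls).1).get? "" = some a ∧
      (bGoL ls dB).get? "" = some b ∧
      a.toList.length < b.toList.length := by
  intro N
  induction N with
  | zero =>
    intro ls hlen dA cur dB h
    cases ls with
    | nil => exact absurd h (by simp [lastBadB])
    | cons x r => exact absurd hlen (by simp)
  | succ N ih =>
    intro ls hlen dA cur dB h
    cases ls with
    | nil => exact absurd h (by simp [lastBadB])
    | cons x r =>
      cases r with
      | nil => exact absurd h (by simp [lastBadB])
      | cons y s =>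
        have hrlen : (y :: s).length ≤ N := by simp only [List.length_cons] at hlen ⊢; omega
        rcases lastBad_cons_elim h with ⟨hany, hlb⟩ | ⟨hnany, hex, hry, hhy⟩
        · -- an empty-named header still lies further right: recurse
          by_cases hdr : (hasEndpoint (PySem.Str.strip x) && !isReset (PySem.Str.strip x)) = true
          · have hdr2 := hdr
            simp only [Bool.and_eq_true] at hdr2
            obtain ⟨hin, hns⟩ := hdr2
            have hsplit : ((y :: s).takeWhile (fun z => !isMarkerL z)) ++
                ((y :: s).dropWhile (fun z => !isMarkerL z)) = y :: s :=
              List.takeWhile_append_dropWhile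
            have hbody : ∀ z ∈ (y :: s).takeWhile (fun z => !isMarkerL z), isEmptyHdr z = false := by
              intro z hz
              have hm := List.mem_takeWhile_imp hz
              exact not_eh_of_notmarker z (by simpa using hm)
            have hrestany : ((y :: s).dropWhile (fun z => !isMarkerL z)).any isEmptyHdr = true := by
              rw [← hsplit, List.any_append] at hany
              have hbf : ((y :: s).takeWhile (fun z => !isMarkerL z)).any isEmptyHdr = false :=
                List.any_eq_false.mpr (fun z hz => by rw [hbody z hz]; simp)
              rw [hbf, Bool.false_or] at hany
              exact hany
            have hlbrest : lastBadB ((y :: s).dropWhile (fun z => !isMarkerL z)) = true := by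
              have := lastBad_skip _ _ hbody hrestany
              rw [hsplit] at this
              rw [← this]
              exact hlb
            have hstep : aStep (dA, cur) x =
                (dA.insert (headerName (PySem.Str.strip x)) [x],
                 some (headerName (PySem.Str.strip x))) := by
              simp only [aStep]
              rw [if_neg (by rw [bnot_true hns]; simp), if_pos hin]
            have hB : bGoL (x :: y :: s) dB = bGoL ((y :: s).dropWhile (fun z => !isMarkerL z))
                (dB.insert (headerName (PySem.Str.strip x))
                  (J (x :: (y :: s).takeWhile (fun z => !isMarkerL z)))) := by
              conv_lhs => rw [bGoL]
              rw [if_pos hdr]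
            rcases hst2 : List.foldl aStep (dA.insert (headerName (PySem.Str.strip x)) [x],
              some (headerName (PySem.Str.strip x)))
              ((y :: s).takeWhile (fun z => !isMarkerL z)) with ⟨d2, c2⟩
            obtain ⟨a, b, ha, hb, hl⟩ := ih ((y :: s).dropWhile (fun z => !isMarkerL z))
              (le_trans (List.length_dropWhile_le _ _) hrlen) d2 c2
              (dB.insert (headerName (PySem.Str.strip x))
                (J (x :: (y :: s).takeWhile (fun z => !isMarkerL z)))) hlbrest
            refine ⟨a, b, ?_, ?_, hl⟩
            · rw [List.foldl_cons, hstep]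
              conv_lhs => rw [← hsplit]
              rw [List.foldl_append, hst2]
              exact ha
            · rw [hB]
              exact hb
          · have hB : bGoL (x :: y :: s) dB = bGoL (y :: s) dB := by
              conv_lhs => rw [bGoL]
              rw [if_neg hdr]
            rcases hst1 : aStep (dA, cur) x with ⟨d1, c1⟩
            obtain ⟨a, b, ha, hb, hl⟩ := ih (y :: s) hrlen d1 c1 dB hlb
            refine ⟨a, b, ?_, ?_, hl⟩
            · rw [List.foldl_cons, hst1]
              exact ha
            · rw [hB]
              exact hb
        · -- x is the last empty-named header, followed by the plain line y
          have hxs := hex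
          simp only [isEmptyHdr, Bool.and_eq_true] at hxs
          obtain ⟨⟨hin, hgsn⟩, hnmb⟩ := hxs
          have hgsf : isReset (PySem.Str.strip x) = false := bnot_true hgsn
          have hnm : headerName (PySem.Str.strip x) = "" := by simpa using hnmb
          have hnoEH : ∀ z ∈ y :: s, isEmptyHdr z = false := by
            intro z hz
            refine bfalse ?_
            intro hez
            rw [List.any_eq_true.mpr ⟨z, hz, hez⟩] at hnany
            exact absurd hnany (by simp)
          have hstep : aStep (dA, cur) x = (dA.insert "" [x], some "") := by
            simp only [aStep]
            rw [if_neg (by rw [hgsf]; simp), if_pos hin, hnm]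
          have hA : (List.foldl aStep (dA, cur) (x :: y :: s)).1.get? "" = some [x] := by
            rw [List.foldl_cons, hstep, A_blank_preserved (y :: s) _ hnoEH]
            exact PySem.Dict.get?_insert_self dA "" [x]
          have hmy : isMarkerL y = false := by
            simp only [isMarkerL]
            rw [hry, hhy]
            rfl
          have hmyt : (!isMarkerL y) = true := by rw [hmy]; rfl
          have hbodyc : (y :: s).takeWhile (fun z => !isMarkerL z) =
              y :: s.takeWhile (fun z => !isMarkerL z) := by
            rw [List.takeWhile_cons]
            simp only [hmyt, if_true]
          have hdr : (hasEndpoint (PySem.Str.strip x) && !isReset (PySem.Str.strip x)) = true := by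
            rw [hin, hgsf]
            rfl
          have hB : bGoL (x :: y :: s) dB = bGoL ((y :: s).dropWhile (fun z => !isMarkerL z))
              (dB.insert "" (J (x :: (y :: s).takeWhile (fun z => !isMarkerL z)))) := by
            conv_lhs => rw [bGoL]
            rw [if_pos hdr, hnm]
          have hBv : (bGoL (x :: y :: s) dB).get? "" =
              some (J (x :: (y :: s).takeWhile (fun z => !isMarkerL z))) := by
            rw [hB, B_blank_preserved ((y :: s).dropWhile (fun z => !isMarkerL z)).length _
              le_rfl _ (fun z hz => hnoEH z (List.Sublist.mem hz (List.dropWhile_sublist _)))]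
            exact PySem.Dict.get?_insert_self dB "" _
          refine ⟨J [x], J (x :: (y :: s).takeWhile (fun z => !isMarkerL z)), ?_, hBv, ?_⟩
          · rw [get?_mapjoin, hA]
            rfl
          · rw [hbodyc]
            exact join_len_lt x y _

-- ===== VERDICT (by name: the statement is the Claim_ definition above) =====
theorem extract_endpoint_blocks_py_spec : Claim_unchanged_extract_endpoint_blocks_py := by
  intro user_context _ hnd
  have hOk : Ok (PySem.Str.splitlines user_context) :=
    ok_of_nlb (PySem.Str.splitlines user_context) (bfalse hnd)
  have hmain := main_A_B (PySem.Str.splitlines user_context).length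
    (PySem.Str.splitlines user_context) le_rfl PySem.Dict.empty PySem.Dict.empty none hOk
    (Or.inl rfl) (Or.inl rfl)
  show extract_endpoint_blocks_py user_context = extract_endpoint_blocks_py_alt user_context
  show (((PySem.Str.splitlines user_context).foldl aStep (PySem.Dict.empty, none)).1.items.foldl
      (fun d p => d.insert p.1 (PySem.Str.join "\n" p.2)) PySem.Dict.empty).items =
    (bGoF (PySem.Str.splitlines user_context).length (PySem.Str.splitlines user_context) 0
      PySem.Dict.empty).items
  rw [post_eq_mapjoin _ (nodup_foldl_A _ _ (by exact List.nodup_nil))]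
  rw [bGo_bridge _ _ _ _ (by omega), List.drop_zero]
  exact congrArg PySem.Dict.items hmain

theorem extract_endpoint_blocks_py_changed : Claim_changed_extract_endpoint_blocks_py := by
  unfold Claim_changed_extract_endpoint_blocks_py; decide

theorem extract_endpoint_blocks_py_tight : Claim_exact_extract_endpoint_blocks_py := by
  intro user_context _ hD heq
  have h1 : extract_endpoint_blocks_py user_context =
      (mapjoin (List.foldl aStep (PySem.Dict.empty, none)
        (PySem.Str.splitlines user_context)).1).items := by
    show (((PySem.Str.splitlines user_context).foldl aStep (PySem.Dict.empty, none)).1.items.foldl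
        (fun d p => d.insert p.1 (PySem.Str.join "\n" p.2)) PySem.Dict.empty).items = _
    exact post_eq_mapjoin _ (nodup_foldl_A _ _ List.nodup_nil)
  have h2 : extract_endpoint_blocks_py_alt user_context =
      (bGoL (PySem.Str.splitlines user_context) PySem.Dict.empty).items := by
    show (bGoF (PySem.Str.splitlines user_context).length (PySem.Str.splitlines user_context) 0
        PySem.Dict.empty).items = _
    rw [bGo_bridge _ _ _ _ (by omega), List.drop_zero]
  obtain ⟨a, b, ha, hb, hl⟩ := diff_go (PySem.Str.splitlines user_context).length
    (PySem.Str.splitlines user_context) le_rfl PySem.Dict.empty none PySem.Dict.empty hD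
  have hitems : (mapjoin (List.foldl aStep (PySem.Dict.empty, none)
      (PySem.Str.splitlines user_context)).1).items =
      (bGoL (PySem.Str.splitlines user_context) PySem.Dict.empty).items := by
    rw [← h1, ← h2, heq]
  have hget : (mapjoin (List.foldl aStep (PySem.Dict.empty, none)
      (PySem.Str.splitlines user_context)).1).get? "" =
      (bGoL (PySem.Str.splitlines user_context) PySem.Dict.empty).get? "" := by
    simp only [PySem.Dict.get?, hitems]
  rw [ha, hb] at hget
  have hab : a = b := Option.some.inj hget
  rw [hab] at hl
  omega
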